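-- pv_equiv track=rewrite | github.com/avk-ho/python_projects | tournament_game_generator/tournament_game_generator.py | desc_sort_teams_by_wins
-- ===== SOURCE A (Python) =====
-- def desc_sort_teams_by_wins(teams_dict):
--     # recursive desc sort
--     def sort_teams_helper(sorted_list, team_name, teams_dict):
--         if len(sorted_list) == 0:
--             sorted_list.append(team_name)
--             return
--
--         prev_team = sorted_list.pop()
--         prev_win = teams_dict[prev_team]
--         team_win = teams_dict[team_name]
--
--         if prev_win >= team_win:
--             sorted_list.append(prev_team)
--             sorted_list.append(team_name)
--         else:
--             sort_teams_helper(sorted_list, team_name, teams_dict)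
--             sorted_list.append(prev_team)
--
--     sorted_teams = []
--     for name, _ in teams_dict.items():
--         sort_teams_helper(sorted_teams, name, teams_dict)
--
--     return sorted_teams
-- ===== SOURCE B (Python) =====
-- def desc_sort_teams_by_wins(teams_dict):
--     # Bucket names by win count (insertion order within a bucket keeps ties stable),
--     # then concatenate buckets by descending win count.
--     buckets = {}
--     for name, wins in teams_dict.items():
--         buckets.setdefault(wins, []).append(name)
--     result = []
--     for wins in sorted(buckets, reverse=True):
--         result += buckets[wins]
--     return result
-- ===== Notes on version B (the rewrite author's own statement) =====
-- stated objective: faster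
-- what changed: Replaces the recursive pop-and-reinsert insertion sort (quadratic in the number of teams, with a dict lookup per comparison) by a one-pass grouping table keyed by win count whose bucket lists are concatenated in descending key order.
import Mathlib
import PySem

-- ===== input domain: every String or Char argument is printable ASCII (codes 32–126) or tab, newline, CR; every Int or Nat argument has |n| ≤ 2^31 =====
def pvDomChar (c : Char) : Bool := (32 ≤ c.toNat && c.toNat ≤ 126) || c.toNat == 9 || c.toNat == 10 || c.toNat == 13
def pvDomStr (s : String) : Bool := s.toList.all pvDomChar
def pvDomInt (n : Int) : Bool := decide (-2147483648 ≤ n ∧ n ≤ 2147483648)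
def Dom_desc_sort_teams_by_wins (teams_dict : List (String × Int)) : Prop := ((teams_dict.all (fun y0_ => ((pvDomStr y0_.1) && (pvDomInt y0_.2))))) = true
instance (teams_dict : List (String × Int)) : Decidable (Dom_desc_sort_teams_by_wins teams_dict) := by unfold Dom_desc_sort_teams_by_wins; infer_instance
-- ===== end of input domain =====

-- B replaces A's recursive pop-and-reinsert insertion sort by a grouping table keyed by
-- win count whose buckets are concatenated in descending key order (return value only).

-- ===== PORT A =====
-- teams_dict[name]: first-match lookup. On Pre_ (names come from the dict itself) the
-- KeyError case is unreachable, so the total '.getD 0' is exact there.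
def pyLookup (teams_dict : List (String × Int)) (n : String) : Int :=
  (teams_dict.lookup n).getD 0

def sort_teams_helper (teams_dict : List (String × Int)) (sorted_list : List String)
    (team_name : String) : List String :=
  match hL : sorted_list.getLast? with
  | none => sorted_list ++ [team_name]          -- len(sorted_list) == 0: append and return
  | some prev_team =>
    let rest := sorted_list.dropLast            -- sorted_list.pop()
    let prev_win := pyLookup teams_dict prev_team
    let team_win := pyLookup teams_dict team_name
    if prev_win ≥ team_win then rest ++ [prev_team, team_name]
    else (sort_teams_helper teams_dict rest team_name) ++ [prev_team]
termination_by sorted_list.length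
decreasing_by
  have hne : sorted_list ≠ [] := by intro hn; subst hn; simp at hL
  have := List.length_pos_iff.mpr hne
  simp [List.length_dropLast]; omega

def desc_sort_teams_by_wins (teams_dict : List (String × Int)) : List String :=
  teams_dict.foldl (fun acc p => sort_teams_helper teams_dict acc p.1) []

-- ===== PORT B =====
-- buckets: win count ↦ names with that count, in first-seen order
def pvBuckets (teams_dict : List (String × Int)) : PySem.Dict Int (List String) :=
  teams_dict.foldl (fun b p => b.modify p.2 [] (fun l => l ++ [p.1])) PySem.Dict.empty

def desc_sort_teams_by_wins_alt (teams_dict : List (String × Int)) : List String :=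
  (PySem.List.sorted (PySem.Dict.keys (pvBuckets teams_dict)) (fun k => k) true).foldl
    (fun acc c => acc ++ (pvBuckets teams_dict).getD c []) []

-- ===== PRECONDITION & SPEC =====
-- Pre_: the team names are pairwise distinct — every Python dict satisfies this (a dict
-- cannot hold duplicate keys), so nothing A accepts is excluded; it only rules out
-- association lists that no Python dict could produce.
def Pre_desc_sort_teams_by_wins (teams_dict : List (String × Int)) : Prop :=
  (teams_dict.map Prod.fst).Nodup
instance (teams_dict : List (String × Int)) : Decidable (Pre_desc_sort_teams_by_wins teams_dict) := by
  unfold Pre_desc_sort_teams_by_wins; infer_instance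

def pvWitness_desc_sort_teams_by_wins : (List (String × Int)) :=
  [("reds", 2), ("blues", 3), ("greens", 3)]

def Spec_desc_sort_teams_by_wins (teams_dict : List (String × Int)) (out : List String) : Prop := out = desc_sort_teams_by_wins_alt teams_dict
instance (teams_dict : List (String × Int)) (out : List String) : Decidable (Spec_desc_sort_teams_by_wins teams_dict out) := by unfold Spec_desc_sort_teams_by_wins; infer_instance

-- ===== CLAIM (what is proved, stated in full; the proofs are below) =====
def Claim_equal_desc_sort_teams_by_wins : Prop := ∀ (teams_dict : List (String × Int)), Dom_desc_sort_teams_by_wins teams_dict → Pre_desc_sort_teams_by_wins teams_dict → Spec_desc_sort_teams_by_wins teams_dict (desc_sort_teams_by_wins teams_dict)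

-- ===== LEMMAS AND PROOFS =====

-- names of xs whose win count is c (in order)
def pvBucket (xs : List (String × Int)) (c : Int) : List String :=
  (xs.filter (fun p => p.2 == c)).map Prod.fst

-- the canonical form both ports are reduced to
def pvCanon (xs : List (String × Int)) : List String :=
  (PySem.List.sorted (PySem.Set.ofList (xs.map Prod.snd)) (fun k => k) true).flatMap (pvBucket xs)

theorem buckets_eq_swapped_foldl (xs : List (String × Int)) :
    (xs.map Prod.swap).foldl
      (fun b (q : Int × String) => b.modify q.1 [] (fun l => l ++ [q.2])) PySem.Dict.empty
    = pvBuckets xs := by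
  rw [List.foldl_map]; rfl

theorem getD_pvBuckets (xs : List (String × Int)) (c : Int) :
    (pvBuckets xs).getD c [] = pvBucket xs c := by
  rw [← buckets_eq_swapped_foldl, PySem.Dict.getD_foldl_modify_append]
  unfold pvBucket
  simp [List.filter_map, Function.comp_def, List.map_map]

theorem keys_pvBuckets (xs : List (String × Int)) :
    (pvBuckets xs).keys = PySem.Set.ofList (xs.map Prod.snd) := by
  rw [← buckets_eq_swapped_foldl,
    PySem.Dict.keys_foldl_modify_key _ Prod.fst [] (fun _ q => (fun l => l ++ [q.2]))]
  simp [List.map_map, Function.comp_def, PySem.Set.update_nil_left]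

theorem alt_eq_canon (xs : List (String × Int)) :
    desc_sort_teams_by_wins_alt xs = pvCanon xs := by
  unfold desc_sort_teams_by_wins_alt pvCanon
  rw [PySem.List.foldl_append_eq_flatMap, keys_pvBuckets]
  simp only [List.nil_append]
  exact List.flatMap_congr (by intro c _; exact getD_pvBuckets xs c)

theorem lookup_of_mem (d : List (String × Int)) (n : String) (c : Int)
    (hnd : (d.map Prod.fst).Nodup) (h : (n, c) ∈ d) : d.lookup n = some c := by
  induction d with
  | nil => simp at h
  | cons p t ih =>
    simp only [List.map_cons, List.nodup_cons] at hnd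
    rcases List.mem_cons.mp h with h | h
    · rw [← h]; simp [List.lookup]
    · have hne : p.1 ≠ n := by
        intro he
        exact hnd.1 (he ▸ (List.mem_map.mpr ⟨(n, c), h, rfl⟩))
      simp only [List.lookup, beq_false_of_ne (Ne.symm hne)]
      exact ih hnd.2 h

-- the helper inserts n after the block of weights ≥ its own, before the block below
theorem helper_split (d : List (String × Int)) (n : String) (l₁ l₂ : List String)
    (h₁ : ∀ a ∈ l₁, pyLookup d n ≤ pyLookup d a)
    (h₂ : ∀ a ∈ l₂, pyLookup d a < pyLookup d n) :
    sort_teams_helper d (l₁ ++ l₂) n = l₁ ++ n :: l₂ := by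
  induction l₂ using List.reverseRecOn with
  | nil =>
    cases l₁ using List.reverseRecOn with
    | nil => simp [sort_teams_helper]
    | append_singleton t a =>
      rw [sort_teams_helper]
      have hw : pyLookup d n ≤ pyLookup d a := h₁ a (by simp)
      split
      · rename_i hh
        simp at hh
      · rename_i prev hh
        rw [List.append_nil, List.getLast?_concat] at hh
        cases hh
        simp [ge_iff_le, hw]
  | append_singleton t a ih =>
    rw [sort_teams_helper]
    have hw : pyLookup d a < pyLookup d n := h₂ a (by simp)
    split
    · rename_i hh
      simp only [← List.append_assoc] at hh
      simp at hh
    · rename_i prev hh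
      simp only [← List.append_assoc] at hh
      rw [List.getLast?_concat] at hh
      cases hh
      rw [if_neg (by omega)]
      simp only [← List.append_assoc, List.dropLast_concat]
      rw [ih (fun b hb => h₂ b (by simp [hb]))]
      simp

theorem filter_split3 (K : List Int) (c : Int) (h : K.Pairwise (fun a b => b < a)) :
    K = K.filter (fun k => decide (c < k)) ++ K.filter (fun k => decide (k = c))
      ++ K.filter (fun k => decide (k < c)) := by
  induction K with
  | nil => simp
  | cons k t ih =>
    rw [List.pairwise_cons] at h
    obtain ⟨hk, ht⟩ := h
    rcases lt_trichotomy c k with hc | hc | hc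
    · have h1 : ¬ (k = c) := by omega
      have h2 : ¬ (k < c) := by omega
      simp only [List.filter_cons, decide_eq_true_eq, if_pos hc, if_neg h1, if_neg h2]
      rw [List.cons_append, List.cons_append]
      exact congrArg (k :: ·) (ih ht)
    · subst hc
      have h1 : t.filter (fun k => decide (c < k)) = [] :=
        List.filter_eq_nil_iff.mpr (fun b hb => by have := hk b hb; simp; omega)
      have h2 : t.filter (fun k => decide (k = c)) = [] :=
        List.filter_eq_nil_iff.mpr (fun b hb => by have := hk b hb; simp; omega)
      have h3 : t.filter (fun k => decide (k < c)) = t :=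
        List.filter_eq_self.mpr (fun b hb => by have := hk b hb; simp; omega)
      simp [h1, h2, h3]
    · have h1 : t.filter (fun k => decide (c < k)) = [] :=
        List.filter_eq_nil_iff.mpr (fun b hb => by have := hk b hb; simp; omega)
      have h2 : t.filter (fun k => decide (k = c)) = [] :=
        List.filter_eq_nil_iff.mpr (fun b hb => by have := hk b hb; simp; omega)
      have h3 : t.filter (fun k => decide (k < c)) = t :=
        List.filter_eq_self.mpr (fun b hb => by have := hk b hb; simp; omega)
      have hkc : ¬ (c < k) := by omega
      have hke : ¬ (k = c) := by omega
      simp [h1, h2, h3, hkc, hke, hc]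

theorem filter_eq_nodup (K : List Int) (c : Int) (h : K.Nodup) :
    K.filter (fun k => decide (k = c)) = if c ∈ K then [c] else [] := by
  induction K with
  | nil => simp
  | cons k t ih =>
    rw [List.nodup_cons] at h
    by_cases hk : k = c
    · subst hk
      have h1 : t.filter (fun x => decide (x = k)) = [] :=
        List.filter_eq_nil_iff.mpr (fun b hb => by simp; intro he; exact h.1 (he ▸ hb))
      simp [h1]
    · simp [hk, ih h.2, List.mem_cons, Ne.symm hk]

theorem canon_step (d : List (String × Int)) (hnd : (d.map Prod.fst).Nodup)
    (xs : List (String × Int)) (n : String) (c : Int)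
    (hsub : ∀ p ∈ xs, p ∈ d) (hmem : (n, c) ∈ d) :
    sort_teams_helper d (pvCanon xs) n = pvCanon (xs ++ [(n, c)]) := by
  have hwn : pyLookup d n = c := by simp [pyLookup, lookup_of_mem d n c hnd hmem]
  have hwb : ∀ k a, a ∈ pvBucket xs k → pyLookup d a = k := by
    intro k a ha
    unfold pvBucket at ha
    rcases List.mem_map.mp ha with ⟨p, hp, rfl⟩
    rcases List.mem_filter.mp hp with ⟨hpx, hpc⟩
    have hp2 : p.2 = k := by simpa using hpc
    have hpd : (p.1, k) ∈ d := by rw [← hp2]; exact hsub p hpx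
    simp [pyLookup, lookup_of_mem d p.1 k hnd hpd]
  set K := PySem.List.sorted (PySem.Set.ofList (xs.map Prod.snd)) (fun k => k) true with hK
  have hKperm : K.Perm (PySem.Set.ofList (xs.map Prod.snd)) := PySem.List.sorted_perm _ _ _
  have hKnd : K.Nodup := hKperm.nodup_iff.mpr (PySem.Set.nodup_ofList _)
  have hKpair : K.Pairwise (fun a b => b ≤ a) := PySem.List.sorted_pairwise_rev _ _
  have hKlt : K.Pairwise (fun a b => b < a) := by
    have hne : K.Pairwise (fun a b => a ≠ b) := hKnd
    exact (hKpair.and hne).imp (fun h => lt_of_le_of_ne h.1 (Ne.symm h.2))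
  have hKmem : ∀ x, x ∈ K ↔ x ∈ xs.map Prod.snd := fun x => by
    rw [hKperm.mem_iff, PySem.Set.mem_ofList]
  set F1 := K.filter (fun k => decide (c < k)) with hF1def
  set F2 := K.filter (fun k => decide (k = c)) with hF2def
  set F3 := K.filter (fun k => decide (k < c)) with hF3def
  have hsplit : K = F1 ++ F2 ++ F3 := by
    rw [hF1def, hF2def, hF3def]; exact filter_split3 K c hKlt
  -- the left-hand side via helper_split
  have hLHS : sort_teams_helper d (pvCanon xs) n
      = (F1 ++ F2).flatMap (pvBucket xs) ++ n :: F3.flatMap (pvBucket xs) := by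
    have hxs : pvCanon xs
        = ((F1 ++ F2).flatMap (pvBucket xs)) ++ (F3.flatMap (pvBucket xs)) := by
      unfold pvCanon
      rw [← hK]
      conv_lhs => rw [hsplit]
      simp [List.flatMap_append, List.append_assoc]
    rw [hxs]
    apply helper_split
    · intro a ha
      rcases List.mem_flatMap.mp ha with ⟨k, hk, hab⟩
      rw [hwb k a hab, hwn]
      rcases List.mem_append.mp hk with hk | hk
      · have := (List.mem_filter.mp hk).2; simp at this; omega
      · have := (List.mem_filter.mp hk).2; simp at this; omega
    · intro a ha
      rcases List.mem_flatMap.mp ha with ⟨k, hk, hab⟩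
      rw [hwb k a hab, hwn]
      have := (List.mem_filter.mp hk).2; simp at this; omega
  -- buckets of the extended list
  have hb' : ∀ k, pvBucket (xs ++ [(n, c)]) k
      = pvBucket xs k ++ (if c = k then [n] else []) := by
    intro k
    unfold pvBucket
    by_cases hck : c = k <;> simp [List.filter_append, hck]
  -- the middle block is exactly the bucket of c
  have hF2 : F2.flatMap (pvBucket xs) = pvBucket xs c := by
    rw [hF2def, filter_eq_nodup K c hKnd]
    by_cases hcK : c ∈ K
    · simp [hcK]
    · have hnob : pvBucket xs c = [] := by
        unfold pvBucket
        rw [List.filter_eq_nil_iff.mpr]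
        · simp
        · intro p hp
          simp only [beq_iff_eq]
          intro he
          exact hcK ((hKmem c).mpr (List.mem_map.mpr ⟨p, hp, he⟩))
      simp [hcK, hnob]
  -- the new sorted key list
  have hpw : (F1 ++ c :: F3).Pairwise (fun a b => b < a) := by
    rw [List.pairwise_append]
    refine ⟨hKlt.filter _, ?_, ?_⟩
    · rw [List.pairwise_cons]
      refine ⟨?_, hKlt.filter _⟩
      intro b hb
      have := (List.mem_filter.mp hb).2; simp at this; omega
    · intro a ha b hb
      have ha' := (List.mem_filter.mp ha).2; simp at ha'
      rcases List.mem_cons.mp hb with hb | hb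
      · omega
      · have := (List.mem_filter.mp hb).2; simp at this; omega
  have hK' : PySem.List.sorted (PySem.Set.ofList ((xs ++ [(n, c)]).map Prod.snd))
        (fun k => k) true = F1 ++ c :: F3 := by
    apply PySem.List.sorted_rev_eq_of_perm_of_pairwise_gt _ _ _ _ hpw
    rw [List.perm_ext_iff_of_nodup (hpw.imp ne_of_gt) (PySem.Set.nodup_ofList _)]
    intro x
    rw [PySem.Set.mem_ofList]
    have hl : x ∈ F1 ++ c :: F3 ↔ (x ∈ K ∧ c < x) ∨ x = c ∨ (x ∈ K ∧ x < c) := by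
      rw [hF1def, hF3def]
      simp [List.mem_filter]
    have hr : x ∈ (xs ++ [(n, c)]).map Prod.snd ↔ x ∈ xs.map Prod.snd ∨ x = c := by
      simp
    rw [hl, hr, ← hKmem x]
    by_cases hxK : x ∈ K <;> by_cases hxc : x = c <;> simp [hxK, hxc] <;> omega
  -- assemble
  rw [hLHS]
  unfold pvCanon
  rw [hK']
  have hbF1 : F1.flatMap (pvBucket (xs ++ [(n, c)])) = F1.flatMap (pvBucket xs) :=
    List.flatMap_congr (fun k hk => by
      have := (List.mem_filter.mp hk).2; simp at this
      rw [hb' k, if_neg (by omega)]; simp)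
  have hbF3 : F3.flatMap (pvBucket (xs ++ [(n, c)])) = F3.flatMap (pvBucket xs) :=
    List.flatMap_congr (fun k hk => by
      have := (List.mem_filter.mp hk).2; simp at this
      rw [hb' k, if_neg (by omega)]; simp)
  simp only [List.flatMap_append, List.flatMap_cons, hbF1, hbF3, hb' c, hF2]
  simp [List.append_assoc]

theorem a_eq_canon (xs : List (String × Int)) (h : (xs.map Prod.fst).Nodup) :
    desc_sort_teams_by_wins xs = pvCanon xs := by
  unfold desc_sort_teams_by_wins
  suffices hgen : ∀ ys : List (String × Int), (∀ p ∈ ys, p ∈ xs) →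
      ys.foldl (fun acc p => sort_teams_helper xs acc p.1) [] = pvCanon ys by
    exact hgen xs (fun p hp => hp)
  intro ys
  induction ys using List.reverseRecOn with
  | nil => intro _; simp [pvCanon]
  | append_singleton t p ih =>
    intro hsub
    rw [List.foldl_append, List.foldl_cons, List.foldl_nil,
      ih (fun q hq => hsub q (by simp [hq]))]
    obtain ⟨n, c⟩ := p
    exact canon_step xs h t n c (fun q hq => hsub q (by simp [hq])) (hsub (n, c) (by simp))

-- ===== VERDICT (by name: the statement is the Claim_ definition above) =====
theorem desc_sort_teams_by_wins_spec : Claim_equal_desc_sort_teams_by_wins := by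
  intro td _ hpre
  unfold Spec_desc_sort_teams_by_wins
  rw [a_eq_canon td hpre, alt_eq_canon]
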